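-- pv_equiv track=rewrite | github.com/tjdms4327/Baekjoon_Python | 백준/Silver/20914. QWERTY 자판/QWERTY 자판.py | bfs
-- ===== SOURCE A (Python) =====
-- from collections import deque
--
-- graph = {
--     'Q':['W','A'],
--     'W':['Q','E','S','A'],
--     'E':['W','R','D','S'],
--     'R':['E','T','F','D'],
--     'T':['R','Y','G','F'],
--     'Y':['T','U','H','G'],
--     'U':['Y','I','J','H'],
--     'I':['U','O','K','J'],
--     'O':['I','P','L','K'],
--     'P':['O','L'],
--
--     'A':['Q','W','S','Z'],
--     'S':['W','E','A','D','Z','X'],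
--     'D':['E','R','S','F','X','C'],
--     'F':['R','T','D','G','C','V'],
--     'G':['T','Y','F','H','V','B'],
--     'H':['Y','U','G','J','B','N'],
--     'J':['U','I','H','K','N','M'],
--     'K':['I','O','J','L','M'],
--     'L':['O','P','K'],
--
--     'Z':['A','S','X'],
--     'X':['S','D','Z','C'],
--     'C':['D','F','X','V'],
--     'V':['F','G','C','B'],
--     'B':['G','H','V','N'],
--     'N':['H','J','B','M'],
--     'M':['J','K','N']
-- }
--
-- def bfs(a, b):
--     if a == b:
--         return 0
--
--     q = deque([(a,0)])
--     visited = set()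
--     visited.add(a)
--
--     while q:
--         node, d = q.popleft()
--         if node == b:
--             return d
--         for nxt in graph[node]:
--             if nxt not in visited:
--                 visited.add(nxt)
--                 q.append((nxt, d+1))
-- ===== SOURCE B (Python) =====
-- # B: O(1) closed-form hex-grid distance via key coordinates instead of BFS.
-- ROWS = ["QWERTYUIOP", "ASDFGHJKL", "ZXCVBNM"]
-- POS = {ch: (r, c) for r, row in enumerate(ROWS) for c, ch in enumerate(row)}
--
-- def bfs(a, b):
--     if a == b:
--         return 0
--     r1, c1 = POS[a]          # KeyError for an invalid first key, like A's graph[node]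
--     if b not in POS:
--         return None          # unreachable/invalid target, like A's fall-through
--     r2, c2 = POS[b]
--     dq = c2 - c1
--     dr = r2 - r1
--     return (abs(dq) + abs(dr) + abs(dq + dr)) // 2
-- ===== Notes on version B (the rewrite author's own statement) =====
-- stated objective: faster
-- what changed: Replaces the per-query BFS over the adjacency dict by mapping each key to its (row,col) keyboard coordinate and returning the axial hex-grid distance as a closed-form arithmetic expression.
-- outside the precondition, e.g. on bfs('Q', 'q'): A returns None, B returns None
import Mathlib
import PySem

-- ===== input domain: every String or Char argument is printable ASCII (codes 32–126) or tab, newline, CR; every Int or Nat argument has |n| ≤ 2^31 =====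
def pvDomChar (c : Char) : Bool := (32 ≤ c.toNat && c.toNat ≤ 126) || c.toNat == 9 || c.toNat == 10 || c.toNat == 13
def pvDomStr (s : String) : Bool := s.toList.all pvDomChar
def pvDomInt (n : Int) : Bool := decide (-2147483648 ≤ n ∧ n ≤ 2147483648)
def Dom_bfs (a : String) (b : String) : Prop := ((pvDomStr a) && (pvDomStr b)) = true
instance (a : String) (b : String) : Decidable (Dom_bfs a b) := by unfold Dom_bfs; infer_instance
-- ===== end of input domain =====

-- B replaces the per-query BFS by an O(1) closed-form hex-grid distance from key coordinates (objective: faster).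

-- ===== PORT A =====
def pvGraph : PySem.Dict String (List String) := PySem.Dict.ofList
  [("Q", ["W","A"]), ("W", ["Q","E","S","A"]), ("E", ["W","R","D","S"]),
   ("R", ["E","T","F","D"]), ("T", ["R","Y","G","F"]), ("Y", ["T","U","H","G"]),
   ("U", ["Y","I","J","H"]), ("I", ["U","O","K","J"]), ("O", ["I","P","L","K"]),
   ("P", ["O","L"]),
   ("A", ["Q","W","S","Z"]), ("S", ["W","E","A","D","Z","X"]),
   ("D", ["E","R","S","F","X","C"]), ("F", ["R","T","D","G","C","V"]),
   ("G", ["T","Y","F","H","V","B"]), ("H", ["Y","U","G","J","B","N"]),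
   ("J", ["U","I","H","K","N","M"]), ("K", ["I","O","J","L","M"]),
   ("L", ["O","P","K"]),
   ("Z", ["A","S","X"]), ("X", ["S","D","Z","C"]), ("C", ["D","F","X","V"]),
   ("V", ["F","G","C","B"]), ("B", ["G","H","V","N"]), ("N", ["H","J","B","M"]),
   ("M", ["J","K","N"])]

-- the `while q:` loop; fuel only makes the recursion structural (the Python loop pops one
-- entry per iteration and enqueues each of the 26 keys at most once, so 64 steps suffice);
-- `none` = queue exhausted (Python returns None) or graph[node] KeyError — both outside Pre_.
def bfsLoop : Nat → List (String × Int) → PySem.Set String → String → Option Int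
  | 0, _, _, _ => none
  | _ + 1, [], _, _ => none
  | fuel + 1, (node, d) :: q, visited, b =>
    if node == b then some d
    else
      match PySem.Dict.get? pvGraph node with
      | none => none
      | some nbrs =>
        let st := nbrs.foldl
          (fun (st : List (String × Int) × PySem.Set String) nxt =>
            if PySem.Set.contains st.2 nxt then st
            else (st.1 ++ [(nxt, d + 1)], PySem.Set.add st.2 nxt))
          (q, visited)
        bfsLoop fuel st.1 st.2 b

def bfs (a : String) (b : String) : Int :=
  if a == b then 0
  else (bfsLoop 64 [(a, 0)] (PySem.Set.add PySem.Set.empty a) b).getD 0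

-- ===== PORT B =====
def pvRows : List String := ["QWERTYUIOP", "ASDFGHJKL", "ZXCVBNM"]

def pvPos : PySem.Dict String (Int × Int) :=
  (PySem.List.enumerate pvRows).foldl
    (fun d rrow =>
      (PySem.List.enumerate rrow.2.toList).foldl
        (fun d cch => PySem.Dict.insert d (String.mk [cch.2]) (rrow.1, cch.1)) d)
    PySem.Dict.empty

def bfs_alt (a : String) (b : String) : Int :=
  if a == b then 0
  else
    match PySem.Dict.get? pvPos a with
    | none => 0   -- Python raises KeyError here; excluded by Pre_
    | some (r1, c1) =>
      match PySem.Dict.get? pvPos b with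
      | none => 0 -- Python returns None here; excluded by Pre_
      | some (r2, c2) =>
        let dq := c2 - c1
        let dr := r2 - r1
        PySem.Int.floordiv (|dq| + |dr| + |dq + dr|) 2

-- ===== PRECONDITION & SPEC =====
def pvKeys : List String :=
  ["Q","W","E","R","T","Y","U","I","O","P","A","S","D","F","G","H","J","K","L",
   "Z","X","C","V","B","N","M"]

-- Pre_ excludes a ≠ b with a not a key (A raises KeyError) and a ≠ b with b not a key
-- (A falls through the loop and returns None, which is not an int).
def Pre_bfs (a : String) (b : String) : Prop := a = b ∨ (a ∈ pvKeys ∧ b ∈ pvKeys)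
instance (a : String) (b : String) : Decidable (Pre_bfs a b) := by unfold Pre_bfs; infer_instance
def pvWitness_bfs : String × String := ("Q", "M")

def Spec_bfs (a : String) (b : String) (out : Int) : Prop := out = bfs_alt a b
instance (a : String) (b : String) (out : Int) : Decidable (Spec_bfs a b out) := by unfold Spec_bfs; infer_instance

-- ===== CLAIM (what is proved, stated in full; the proofs are below) =====
def Claim_equal_bfs : Prop := ∀ (a : String) (b : String), Dom_bfs a b → Pre_bfs a b → Spec_bfs a b (bfs a b)

-- ===== LEMMAS AND PROOFS =====
theorem bfs_keys_eq : ∀ a ∈ pvKeys, ∀ b ∈ pvKeys, bfs a b = bfs_alt a b := by decide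

-- ===== VERDICT (by name: the statement is the Claim_ definition above) =====
theorem bfs_spec : Claim_equal_bfs := by
  intro a b _ hpre
  unfold Spec_bfs
  rcases hpre with h | ⟨ha, hb⟩
  · subst h; simp [bfs, bfs_alt]
  · exact bfs_keys_eq a ha b hb
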